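-- pv_equiv track=rewrite | github.com/FulsomePlot447/Nirvaan | main.py | detect_timetable_request
-- ===== SOURCE A (Python) =====
-- def detect_timetable_request(query: str) -> bool:
--     """Detect if the user is asking for a timetable"""
--     timetable_keywords = [
--         'timetable', 'time table', 'schedule', 'planner', 'calendar',
--         'weekly schedule', 'daily schedule', 'class schedule', 'work schedule',
--         'routine', 'agenda', 'plan', 'timeline', 'itinerary'
--     ]
--     query_lower = query.lower()
--     return any(keyword in query_lower for keyword in timetable_keywords)
-- ===== SOURCE B (Python) =====
-- # Position-driven single scan: at each start index, test the (redundancy-reduced)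
-- # keyword set as prefixes of the lowercased query, instead of one substring search
-- # per keyword.  The reduced set is equivalent because every removed keyword
-- # ('planner', 'weekly/daily/class/work schedule') contains a kept one as substring.
-- _KEYWORDS = ('timetable', 'time table', 'schedule', 'plan', 'calendar',
--              'routine', 'agenda', 'timeline', 'itinerary')
--
-- def detect_timetable_request(query: str) -> bool:
--     q = query.lower()
--     return any(q.startswith(_KEYWORDS, i) for i in range(len(q) + 1))
-- ===== Notes on version B (the rewrite author's own statement) =====
-- stated objective: alternative
-- what changed: Replaces the keyword-by-keyword substring loop with a single position-driven scan (startswith at every start index) over a redundancy-reduced keyword set: the five keywords that contain another keyword as a substring are dropped.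
import Mathlib
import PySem

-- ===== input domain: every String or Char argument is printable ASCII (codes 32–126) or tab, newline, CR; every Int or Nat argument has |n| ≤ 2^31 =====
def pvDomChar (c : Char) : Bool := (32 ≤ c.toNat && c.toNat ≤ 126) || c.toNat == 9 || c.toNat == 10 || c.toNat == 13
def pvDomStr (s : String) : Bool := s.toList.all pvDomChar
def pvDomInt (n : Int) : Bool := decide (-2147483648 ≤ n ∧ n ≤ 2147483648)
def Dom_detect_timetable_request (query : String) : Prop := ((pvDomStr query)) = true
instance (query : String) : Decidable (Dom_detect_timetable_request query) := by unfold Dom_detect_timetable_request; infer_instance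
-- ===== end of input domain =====

-- B replaces A's per-keyword substring loop by one position-driven prefix scan over a
-- redundancy-reduced keyword set (alternative decomposition; same asymptotic cost).

-- ===== PORT A =====
def pvKeywordsA : List String :=
  ["timetable", "time table", "schedule", "planner", "calendar",
   "weekly schedule", "daily schedule", "class schedule", "work schedule",
   "routine", "agenda", "plan", "timeline", "itinerary"]

def detect_timetable_request (query : String) : Bool :=
  let query_lower := PySem.Str.lower query
  pvKeywordsA.any (fun keyword => PySem.Str.isIn keyword query_lower)

-- ===== PORT B =====
def pvKeywordsB : List String :=
  ["timetable", "time table", "schedule", "plan", "calendar",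
   "routine", "agenda", "timeline", "itinerary"]

-- q.startswith(tuple, i) with 0 ≤ i ≤ len(q) is exactly: some member is a prefix of q[i:].
def detect_timetable_request_alt (query : String) : Bool :=
  let q := PySem.Str.lower query
  (List.range (q.toList.length + 1)).any (fun i =>
    pvKeywordsB.any (fun k => PySem.Chars.startswith (q.toList.drop i) k.toList))

-- ===== PRECONDITION & SPEC =====
def Spec_detect_timetable_request (query : String) (out : Bool) : Prop := out = detect_timetable_request_alt query
instance (query : String) (out : Bool) : Decidable (Spec_detect_timetable_request query out) := by unfold Spec_detect_timetable_request; infer_instance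

-- ===== CLAIM (what is proved, stated in full; the proofs are below) =====
def Claim_equal_detect_timetable_request : Prop := ∀ (query : String), Dom_detect_timetable_request query → Spec_detect_timetable_request query (detect_timetable_request query)

-- ===== LEMMAS AND PROOFS =====

-- Core equivalence on the lowercased character list.
theorem pv_scan_eq_anyIn (q : List Char) :
    ((List.range (q.length + 1)).any (fun i =>
      pvKeywordsB.any (fun k => PySem.Chars.startswith (q.drop i) k.toList))) =
    (pvKeywordsA.any (fun k => PySem.Chars.isIn k.toList q)) := by
  rw [Bool.eq_iff_iff]
  simp only [List.any_eq_true, List.mem_range]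
  constructor
  · rintro ⟨i, _, k, hk, hpre⟩
    have hkA : ∀ x ∈ pvKeywordsB, x ∈ pvKeywordsA := by decide
    refine ⟨k, hkA k hk, ?_⟩
    rw [PySem.Chars.isIn_iff_infix]
    exact ((PySem.Chars.startswith_iff _ _).mp hpre).isInfix.trans (q.drop_suffix i).isInfix
  · rintro ⟨k, hk, hin⟩
    have hred : ∀ k ∈ pvKeywordsA, ∃ k' ∈ pvKeywordsB,
        PySem.Chars.isIn k'.toList k.toList = true := by decide
    obtain ⟨k', hk', hin'⟩ := hred k hk
    have hinf : k'.toList <:+: q :=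
      ((PySem.Chars.isIn_iff_infix _ _).mp hin').trans
        ((PySem.Chars.isIn_iff_infix _ _).mp hin)
    obtain ⟨s, t, hst⟩ := hinf
    refine ⟨s.length, ?_, k', hk', ?_⟩
    · have := congrArg List.length hst
      simp at this
      omega
    · rw [PySem.Chars.startswith_iff]
      have hdrop : q.drop s.length = k'.toList ++ t := by
        rw [← hst, List.append_assoc, List.drop_left]
      rw [hdrop]
      exact ⟨t, rfl⟩

-- ===== VERDICT (by name: the statement is the Claim_ definition above) =====
theorem detect_timetable_request_spec : Claim_equal_detect_timetable_request := by
  intro query _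
  unfold Spec_detect_timetable_request detect_timetable_request detect_timetable_request_alt
  simp only [PySem.Str.isIn_eq]
  exact (pv_scan_eq_anyIn (PySem.Str.lower query).toList).symm
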